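-- pv_equiv track=rewrite | github.com/21bq1a4232/Programming_examples | vov.py | replaceV
-- ===== SOURCE A (Python) =====
-- def replaceV(S):
--   vowels=list("aeiouAEIOU")
--   L=list(S)
--   for i in range(len(L)-2):
--     if L[i] in vowels and L[i+1] in vowels and L[i+2] in vowels:
--       L[i]='*'
--       L[1+i]="*"
--       L[i+2]="*"
--       i+=2
--   return("".join(L).replace("***","_"))
-- ===== SOURCE B (Python) =====
-- def replaceV(S):
--     vowels = set("aeiouAEIOU")
--     out = []
--     i = 0
--     n = len(S)
--     while i < n:
--         if S[i] in vowels: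
--             j = i
--             while j < n and S[j] in vowels:
--                 j += 1
--             m = 3 * ((j - i) // 3)
--             out.append('*' * m + S[i + m:j])
--             i = j
--         else:
--             out.append(S[i])
--             i += 1
--     return "".join(out).replace("***", "_")
-- ===== Notes on version B (the rewrite author's own statement) =====
-- stated objective: simpler
-- what changed: A slides a 3-index window over a mutable char list, re-reading cells it may already have starred; B instead scans maximal vowel runs in one forward pass and stars the first 3*(k//3) characters of each run of length k, keeping the identical final collapse of starred triples to underscores.
import Mathlib
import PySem

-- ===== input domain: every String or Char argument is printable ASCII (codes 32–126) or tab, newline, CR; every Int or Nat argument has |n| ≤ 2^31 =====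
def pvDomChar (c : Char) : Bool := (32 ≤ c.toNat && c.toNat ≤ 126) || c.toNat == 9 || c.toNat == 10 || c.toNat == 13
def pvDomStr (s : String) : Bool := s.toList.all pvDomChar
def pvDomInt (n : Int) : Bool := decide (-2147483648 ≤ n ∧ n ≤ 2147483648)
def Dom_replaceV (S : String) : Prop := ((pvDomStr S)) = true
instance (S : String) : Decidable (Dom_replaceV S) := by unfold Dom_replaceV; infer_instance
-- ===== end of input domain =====

-- B replaces A's index-window scan (re-reading possibly-already-starred cells) by a run-length pass
-- starring the first 3*(k/3) characters of each maximal vowel run; objective: simpler.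

-- ===== PORT A =====
def vowelsA : List Char := "aeiouAEIOU".toList

def stepA (L : List Char) (i : Int) : List Char :=
  if ((PySem.List.pyGet? L i).any (fun c => vowelsA.contains c))
     && ((PySem.List.pyGet? L (i + 1)).any (fun c => vowelsA.contains c))
     && ((PySem.List.pyGet? L (i + 2)).any (fun c => vowelsA.contains c)) then
    PySem.List.pySetD (PySem.List.pySetD (PySem.List.pySetD L i '*') (1 + i) '*') (i + 2) '*'
  else L

def replaceV (S : String) : String :=
  let L := S.toList
  let L2 := (PySem.List.pyRange 0 ((L.length : Int) - 2) 1).foldl stepA L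
  PySem.Str.replace (String.ofList L2) "***" "_"

-- ===== PORT B =====
def vowelsB : PySem.Set Char := PySem.Set.ofList "aeiouAEIOU".toList

def pvIsVowel (c : Char) : Bool := PySem.Set.contains vowelsB c

def altGo : List Char → List Char
  | [] => []
  | c :: rest =>
    if h : pvIsVowel c then
      let run := List.takeWhile pvIsVowel (c :: rest)
      let m := 3 * (run.length / 3)
      List.replicate m '*' ++ run.drop m ++ altGo (List.dropWhile pvIsVowel (c :: rest))
    else c :: altGo rest
termination_by l => l.length
decreasing_by
  · simp only [List.dropWhile, h]
    have := List.length_dropWhile_le pvIsVowel rest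
    simp only [List.length_cons]
    omega
  · simp

def replaceV_alt (S : String) : String :=
  PySem.Str.replace (String.ofList (altGo S.toList)) "***" "_"

-- ===== PRECONDITION & SPEC =====
def Spec_replaceV (S : String) (out : String) : Prop := out = replaceV_alt S
instance (S : String) (out : String) : Decidable (Spec_replaceV S out) := by unfold Spec_replaceV; infer_instance

-- ===== CLAIM (what is proved, stated in full; the proofs are below) =====
def Claim_equal_replaceV : Prop := ∀ (S : String), Dom_replaceV S → Spec_replaceV S (replaceV S)

-- ===== LEMMAS AND PROOFS =====

-- A's loop, re-expressed locally: star the 3-window at the cursor if all three cells are vowels.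
def fA : List Char → List Char
  | a :: b :: c :: r =>
    if vowelsA.contains a && vowelsA.contains b && vowelsA.contains c then
      '*' :: fA ('*' :: '*' :: r)
    else
      a :: fA (b :: c :: r)
  | l => l
termination_by l => l.length

lemma star_not_vowel : vowelsA.contains '*' = false := by decide

lemma fA_cons_not_vowel (x : Char) (l : List Char) (hx : vowelsA.contains x = false) :
    fA (x :: l) = x :: fA l := by
  match l with
  | [] => simp [fA]
  | [b] => simp [fA]
  | b :: c :: r =>
    rw [fA, if_neg (by simp only [hx, Bool.false_and]; exact Bool.false_ne_true)]

lemma fA_star2 (r : List Char) : fA ('*' :: '*' :: r) = '*' :: '*' :: fA r := by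
  rw [fA_cons_not_vowel '*' _ star_not_vowel, fA_cons_not_vowel '*' _ star_not_vowel]

lemma range_short (n : Int) (m : Nat) (h : m ≤ 2) :
    PySem.List.pyRange n (n + (m : Int) - 2) 1 = [] :=
  PySem.List.pyRange_one_eq_nil (by omega)

lemma lemA (k : Nat) : ∀ (suf pre : List Char), suf.length = k →
    (PySem.List.pyRange (pre.length : Int) ((pre.length : Int) + (suf.length : Int) - 2) 1).foldl stepA (pre ++ suf)
      = pre ++ fA suf := by
  induction k using Nat.strong_induction_on with
  | _ k IH =>
    intro suf pre hlen
    rcases suf with _ | ⟨a, _ | ⟨b, _ | ⟨c, r⟩⟩⟩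
    · rw [range_short _ _ (by simp)]; simp [fA]
    · rw [range_short _ _ (by simp)]; simp [fA]
    · rw [range_short _ _ (by simp)]; simp [fA]
    · have hcons : (PySem.List.pyRange (pre.length : Int) ((pre.length : Int) + ((a::b::c::r).length : Int) - 2) 1)
          = (pre.length : Int) :: PySem.List.pyRange ((pre.length : Int) + 1) ((pre.length : Int) + ((a::b::c::r).length : Int) - 2) 1 := by
        apply PySem.List.pyRange_one_cons
        simp only [List.length_cons]
        push_cast
        omega
      rw [hcons, List.foldl_cons]
      have hga : PySem.List.pyGet? (pre ++ a :: b :: c :: r) (pre.length : Int) = some a :=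
        PySem.List.pyGet?_append_length pre (b :: c :: r) a
      have hgb : PySem.List.pyGet? (pre ++ a :: b :: c :: r) ((pre.length : Int) + 1) = some b := by
        have := PySem.List.pyGet?_append_right pre (a :: b :: c :: r) 1
        simpa using this
      have hgc : PySem.List.pyGet? (pre ++ a :: b :: c :: r) ((pre.length : Int) + 2) = some c := by
        have := PySem.List.pyGet?_append_right pre (a :: b :: c :: r) 2
        simpa using this
      by_cases hv : (vowelsA.contains a && vowelsA.contains b && vowelsA.contains c) = true
      · -- all three vowels: the window is starred
        have hstep : stepA (pre ++ a :: b :: c :: r) (pre.length : Int)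
            = (pre ++ ['*']) ++ '*' :: '*' :: r := by
          unfold stepA
          rw [hga, hgb, hgc]
          simp only [Option.any_some]
          rw [if_pos hv]
          have h1 : (1 : Int) + (pre.length : Int) = ((pre.length + 1 : Nat) : Int) := by push_cast; omega
          have h2 : ((pre.length : Int) + 2) = ((pre.length + 2 : Nat) : Int) := by push_cast; omega
          rw [h1, h2]
          simp only [PySem.List.pySetD_natCast]
          have e1 : (pre ++ a :: b :: c :: r).set pre.length '*' = pre ++ '*' :: b :: c :: r := by
            rw [List.set_append_right _ _ (le_refl _), Nat.sub_self]
            simp [List.set_cons_zero, List.set_cons_succ]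
          rw [e1]
          have e2 : (pre ++ '*' :: b :: c :: r).set (pre.length + 1) '*' = pre ++ '*' :: '*' :: c :: r := by
            rw [List.set_append_right _ _ (by omega),
              show pre.length + 1 - pre.length = 1 from by omega]
            simp [List.set_cons_zero, List.set_cons_succ]
          rw [e2]
          have e3 : (pre ++ '*' :: '*' :: c :: r).set (pre.length + 2) '*' = pre ++ '*' :: '*' :: '*' :: r := by
            rw [List.set_append_right _ _ (by omega),
              show pre.length + 2 - pre.length = 2 from by omega]
            simp [List.set_cons_zero, List.set_cons_succ]
          rw [e3]
          simp
        rw [hstep]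
        have harg : ((pre.length : Int) + 1) = (((pre ++ ['*']).length : Nat) : Int) := by
          simp
        have hub : ((pre.length : Int) + (((a::b::c::r) : List Char).length : Int) - 2)
            = (((pre ++ ['*']).length : Nat) : Int) + ((('*' :: '*' :: r : List Char).length : Nat) : Int) - 2 := by
          simp only [List.length_append, List.length_cons, List.length_nil]
          push_cast; omega
        rw [harg, hub]
        rw [IH ('*' :: '*' :: r).length (by simp only [List.length_cons] at hlen ⊢; omega)
          ('*' :: '*' :: r) (pre ++ ['*']) rfl]
        have hfr : fA (a :: b :: c :: r) = '*' :: '*' :: '*' :: fA r := by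
          rw [fA, if_pos hv, fA_star2]
        rw [hfr, fA_star2]
        simp
      · -- not all vowels: list unchanged, move on
        have hstep : stepA (pre ++ a :: b :: c :: r) (pre.length : Int) = pre ++ a :: b :: c :: r := by
          unfold stepA
          rw [hga, hgb, hgc]
          simp only [Option.any_some]
          rw [if_neg hv]
        rw [hstep]
        have harg : ((pre.length : Int) + 1) = (((pre ++ [a]).length : Nat) : Int) := by
          simp
        have hub : ((pre.length : Int) + (((a::b::c::r) : List Char).length : Int) - 2)
            = (((pre ++ [a]).length : Nat) : Int) + (((b :: c :: r : List Char).length : Nat) : Int) - 2 := by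
          simp only [List.length_append, List.length_cons, List.length_nil]
          push_cast; omega
        have hre : pre ++ a :: b :: c :: r = (pre ++ [a]) ++ b :: c :: r := by simp
        rw [harg, hub, hre]
        rw [IH (b :: c :: r).length (by simp only [List.length_cons] at hlen ⊢; omega)
          (b :: c :: r) (pre ++ [a]) rfl]
        have hfr : fA (a :: b :: c :: r) = a :: fA (b :: c :: r) := by
          rw [fA, if_neg hv]
        rw [hfr]
        simp

lemma vowel_eq (c : Char) : pvIsVowel c = vowelsA.contains c := by
  have h : vowelsB = vowelsA := by decide
  simp [pvIsVowel, h, PySem.Set.contains]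

lemma vowel_mem (c : Char) : (c ∈ vowelsA) ↔ pvIsVowel c = true := by
  rw [vowel_eq, List.contains_eq_mem, decide_eq_true_iff]

lemma altGo_char (r : List Char) :
    altGo r = List.replicate (3 * ((r.takeWhile pvIsVowel).length / 3)) '*'
        ++ (r.takeWhile pvIsVowel).drop (3 * ((r.takeWhile pvIsVowel).length / 3))
        ++ altGo (r.dropWhile pvIsVowel) := by
  match r with
  | [] => simp [altGo]
  | c :: rest =>
    cases h : pvIsVowel c
    · simp only [List.takeWhile, List.dropWhile, h]
      simp
    · rw [altGo]; simp [h]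

lemma fA_eq_altGo (k : Nat) : ∀ l : List Char, l.length = k → fA l = altGo l := by
  induction k using Nat.strong_induction_on with
  | _ k IH =>
    intro l hlen
    rcases l with _ | ⟨a, _ | ⟨b, _ | ⟨c, r⟩⟩⟩
    · simp [fA, altGo]
    · rw [altGo_char]
      cases h : pvIsVowel a <;>
        simp [fA, List.takeWhile, List.dropWhile, h, altGo]
    · rw [altGo_char]
      cases ha : pvIsVowel a <;> cases hb : pvIsVowel b <;>
        simp [fA, List.takeWhile, List.dropWhile, ha, hb, altGo]
    · cases ha : pvIsVowel a
      case false =>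
        have hfr : fA (a :: b :: c :: r) = a :: fA (b :: c :: r) := by
          rw [fA, if_neg (by simp [vowel_mem, ha])]
        rw [hfr, IH (b :: c :: r).length (by simp only [List.length_cons] at hlen ⊢; omega)
          (b :: c :: r) rfl]
        conv_rhs => rw [altGo]
        simp [ha]
      case true =>
      cases hb : pvIsVowel b
      case false =>
        have hfr : fA (a :: b :: c :: r) = a :: fA (b :: c :: r) := by
          rw [fA, if_neg (by simp [vowel_mem, hb])]
        rw [hfr, IH (b :: c :: r).length (by simp only [List.length_cons] at hlen ⊢; omega)
          (b :: c :: r) rfl]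
        rw [altGo_char (a :: b :: c :: r), altGo_char (b :: c :: r)]
        simp [List.takeWhile, List.dropWhile, ha, hb]
      case true =>
      cases hc : pvIsVowel c
      case false =>
        have hfr : fA (a :: b :: c :: r) = a :: fA (b :: c :: r) := by
          rw [fA, if_neg (by simp [vowel_mem, hc])]
        rw [hfr, IH (b :: c :: r).length (by simp only [List.length_cons] at hlen ⊢; omega)
          (b :: c :: r) rfl]
        rw [altGo_char (a :: b :: c :: r), altGo_char (b :: c :: r)]
        simp [List.takeWhile, List.dropWhile, ha, hb, hc]
      case true =>
      -- a full vowel window: both star three cells and continue after it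
      have hfr : fA (a :: b :: c :: r) = '*' :: '*' :: '*' :: fA r := by
        rw [fA, if_pos (by simp [vowel_mem, ha, hb, hc]), fA_star2]
      rw [hfr, IH r.length (by simp only [List.length_cons] at hlen ⊢; omega) r rfl]
      rw [altGo_char (a :: b :: c :: r), altGo_char r]
      simp only [List.takeWhile, List.dropWhile, ha, hb, hc]
      simp only [List.length_cons]
      rw [show 3 * (((r.takeWhile pvIsVowel).length + 1 + 1 + 1) / 3)
          = 3 * ((r.takeWhile pvIsVowel).length / 3) + 1 + 1 + 1 from by omega]
      simp [List.drop_succ_cons, List.replicate_succ]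

-- ===== VERDICT (by name: the statement is the Claim_ definition above) =====
theorem replaceV_spec : Claim_equal_replaceV := by
  intro S _
  unfold Spec_replaceV
  simp only [replaceV, replaceV_alt]
  have h := lemA S.toList.length S.toList [] rfl
  simp only [List.length_nil, Nat.cast_zero, List.nil_append, zero_add] at h
  rw [h, fA_eq_altGo S.toList.length S.toList rfl]
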